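-- pv_equiv track=rewrite | github.com/jefinagilbert/problemSolving | hr108_marcsCakeWalk.py | marcsCakewalk
-- ===== SOURCE A (Python) =====
-- def marcsCakewalk(calorie):
--     a = 0
--     j = 0
--     calorie.sort()
--     for i in reversed(calorie):
--         a += i*(2**j)
--         j += 1
--     return a
-- ===== SOURCE B (Python) =====
-- def marcsCakewalk(calorie):
--     calorie.sort()
--     acc = 0
--     for c in calorie:
--         acc = acc * 2 + c
--     return acc
-- ===== Notes on version B (the rewrite author's own statement) =====
-- stated objective: faster
-- what changed: Replaces the reversed-iteration loop that computes an explicit big-int power 2**j for every element with a single ascending Horner-style fold acc = acc*2 + c over the sorted list, so no exponentiation is ever computed.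
import Mathlib
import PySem

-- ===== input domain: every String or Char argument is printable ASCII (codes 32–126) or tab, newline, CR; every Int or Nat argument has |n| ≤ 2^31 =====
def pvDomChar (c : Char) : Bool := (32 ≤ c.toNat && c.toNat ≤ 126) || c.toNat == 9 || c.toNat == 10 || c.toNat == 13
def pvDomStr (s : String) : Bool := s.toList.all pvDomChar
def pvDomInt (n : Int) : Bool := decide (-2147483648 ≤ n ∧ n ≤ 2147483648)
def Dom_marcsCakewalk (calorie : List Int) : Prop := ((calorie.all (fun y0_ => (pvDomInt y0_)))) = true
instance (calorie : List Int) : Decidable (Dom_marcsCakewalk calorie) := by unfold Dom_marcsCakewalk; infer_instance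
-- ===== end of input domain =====

-- B sorts in place and folds acc = acc*2 + c (Horner) instead of summing i*2**j over the
-- reversed list; both A and B sort `calorie` in place (same mutation), equivalence is about the return value.
-- ===== PORT A =====
-- loop body of A: a += i*(2**j); j += 1.  j is a loop counter starting at 0 and only
-- incremented, so it is carried as a Nat (Python's 2**j with j ≥ 0 is exactly 2^j).
def marcsCakewalkStep (p : Int × Nat) (i : Int) : Int × Nat :=
  (p.1 + i * (2 ^ p.2 : Int), p.2 + 1)

def marcsCakewalk (calorie : List Int) : Int :=
  let sorted := PySem.List.sorted calorie (fun x => x) false   -- calorie.sort()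
  (sorted.reverse.foldl marcsCakewalkStep (0, 0)).1            -- for i in reversed(calorie)

-- ===== PORT B =====
def marcsCakewalk_alt (calorie : List Int) : Int :=
  let sorted := PySem.List.sorted calorie (fun x => x) false   -- calorie.sort()
  sorted.foldl (fun acc c => acc * 2 + c) 0

-- ===== PRECONDITION & SPEC =====
def Spec_marcsCakewalk (calorie : List Int) (out : Int) : Prop := out = marcsCakewalk_alt calorie
instance (calorie : List Int) (out : Int) : Decidable (Spec_marcsCakewalk calorie out) := by unfold Spec_marcsCakewalk; infer_instance

-- ===== CLAIM (what is proved, stated in full; the proofs are below) =====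
def Claim_equal_marcsCakewalk : Prop := ∀ (calorie : List Int), Dom_marcsCakewalk calorie → Spec_marcsCakewalk calorie (marcsCakewalk calorie)

-- ===== LEMMAS AND PROOFS =====
-- Horner value of a list
def pvHorner (l : List Int) : Int := l.foldl (fun acc c => acc * 2 + c) 0

theorem pvHorner_append_singleton (l : List Int) (x : Int) :
    pvHorner (l ++ [x]) = pvHorner l * 2 + x := by
  simp [pvHorner, List.foldl_append]

-- A's loop over m starting from (a, j) yields a + Horner(m.reverse) * 2^j
theorem marcsCakewalk_loop (m : List Int) : ∀ (a : Int) (j : Nat),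
    (m.foldl marcsCakewalkStep (a, j)).1 = a + pvHorner m.reverse * 2 ^ j := by
  induction m with
  | nil => intro a j; simp [pvHorner]
  | cons x t ih =>
    intro a j
    simp only [List.foldl_cons, marcsCakewalkStep]
    rw [ih]
    simp only [List.reverse_cons, pvHorner_append_singleton]
    ring

-- ===== VERDICT (by name: the statement is the Claim_ definition above) =====
theorem marcsCakewalk_spec : Claim_equal_marcsCakewalk := by
  intro calorie _
  unfold Spec_marcsCakewalk marcsCakewalk marcsCakewalk_alt
  rw [marcsCakewalk_loop]
  simp [pvHorner]
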